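-- pv_equiv track=rewrite | github.com/egil10/gpfg-quiz | inspiration/scripts/clean.py | check_modern_photograph
-- ===== SOURCE A (Python) =====
-- def check_modern_photograph(url, title):
--     """Check if this is a modern photograph rather than a painting"""
--     photo_indicators = [
--         'photograph', 'photo', 'fotografi', 'foto',
--         'digital', 'scan', 'scanned', 'digitized',
--         'camera', 'lens', 'aperture', 'shutter'
--     ]
--
--     combined_text = (url + ' ' + title).lower()
--     for indicator in photo_indicators:
--         if indicator in combined_text:
--             return True, "Modern photograph"
--     return False, None
-- ===== SOURCE B (Python) =====
-- def check_modern_photograph(url, title):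
--     """Check if this is a modern photograph rather than a painting"""
--     photo_indicators = (
--         'photograph', 'photo', 'fotografi', 'foto',
--         'digital', 'scan', 'scanned', 'digitized',
--         'camera', 'lens', 'aperture', 'shutter'
--     )
--     text = (url + ' ' + title).lower()
--     for i in range(len(text)):
--         if text.startswith(photo_indicators, i):
--             return True, "Modern photograph"
--     return False, None
-- ===== Notes on version B (the rewrite author's own statement) =====
-- stated objective: alternative
-- what changed: Replaces twelve independent substring-containment passes over the combined text with a single left-to-right scan that at each position tests whether any of the twelve indicators starts there (str.startswith with a tuple).
import Mathlib
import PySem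

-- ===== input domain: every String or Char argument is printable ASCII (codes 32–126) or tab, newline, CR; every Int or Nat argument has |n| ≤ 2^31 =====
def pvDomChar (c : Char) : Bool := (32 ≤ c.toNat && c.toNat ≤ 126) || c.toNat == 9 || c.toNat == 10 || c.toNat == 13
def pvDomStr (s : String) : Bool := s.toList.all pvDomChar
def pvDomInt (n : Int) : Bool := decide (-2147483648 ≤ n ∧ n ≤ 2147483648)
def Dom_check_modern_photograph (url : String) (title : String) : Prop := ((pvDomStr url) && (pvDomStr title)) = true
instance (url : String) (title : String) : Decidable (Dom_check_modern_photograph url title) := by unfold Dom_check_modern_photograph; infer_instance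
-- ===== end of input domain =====

-- B replaces twelve independent substring-containment passes with one left-to-right scan
-- of the combined text that tests at each position whether any indicator starts there
-- (alternative traversal, same exact return tuples).


-- ===== PORT A =====
-- the literal list of photo indicators from A (as lists of chars)
def photoIndicators : List (List Char) :=
  [ "photograph".toList, "photo".toList, "fotografi".toList, "foto".toList,
    "digital".toList, "scan".toList, "scanned".toList, "digitized".toList,
    "camera".toList, "lens".toList, "aperture".toList, "shutter".toList ]

-- A's loop: return at the FIRST indicator contained in the combined text
def aIndicatorLoop (inds : List (List Char)) (combined : List Char) : Bool × Option String :=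
  match inds with
  | [] => (false, none)
  | ind :: rest =>
      if PySem.Chars.isIn ind combined then (true, some "Modern photograph")
      else aIndicatorLoop rest combined

def check_modern_photograph (url : String) (title : String) : Bool × Option String :=
  let combined := PySem.Chars.lower (url.toList ++ [' '] ++ title.toList)
  aIndicatorLoop photoIndicators combined

-- ===== PORT B =====
-- text.startswith(photo_indicators, i): does any indicator start at the head of this suffix?
def startsAnyIndicator (suffix : List Char) : Bool :=
  photoIndicators.any (fun p => PySem.Chars.startswith suffix p)

-- B's loop: for i in range(len(text)), test startswith at position i (suffix recursion)
def bScan (text : List Char) : Bool :=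
  match text with
  | [] => false
  | c :: rest => if startsAnyIndicator (c :: rest) then true else bScan rest

def check_modern_photograph_alt (url : String) (title : String) : Bool × Option String :=
  let text := PySem.Chars.lower (url.toList ++ [' '] ++ title.toList)
  if bScan text then (true, some "Modern photograph") else (false, none)

-- ===== PRECONDITION & SPEC =====
def Spec_check_modern_photograph (url : String) (title : String) (out : Bool × Option String) : Prop := out = check_modern_photograph_alt url title
instance (url : String) (title : String) (out : Bool × Option String) : Decidable (Spec_check_modern_photograph url title out) := by unfold Spec_check_modern_photograph; infer_instance

-- ===== CLAIM (what is proved, stated in full; the proofs are below) =====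
def Claim_equal_check_modern_photograph : Prop := ∀ (url : String) (title : String), Dom_check_modern_photograph url title → Spec_check_modern_photograph url title (check_modern_photograph url title)

-- ===== LEMMAS AND PROOFS =====

-- A's first-match loop returns the same tuple for ANY contained indicator, so it equals
-- the existence test.
lemma aIndicatorLoop_eq_any (inds : List (List Char)) (combined : List Char) :
    aIndicatorLoop inds combined =
      (if inds.any (fun ind => PySem.Chars.isIn ind combined) then (true, some "Modern photograph")
       else (false, none)) := by
  induction inds with
  | nil => simp [aIndicatorLoop]
  | cons ind rest ih =>
      simp only [aIndicatorLoop, List.any_cons, ih]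
      by_cases h : PySem.Chars.isIn ind combined = true <;> simp [h]

-- No indicator starts at or past the end of the text (all indicators are nonempty).
lemma startsAnyIndicator_nil : startsAnyIndicator [] = false := by decide

-- B's scan is true iff some suffix starts with some indicator.
lemma bScan_iff (text : List Char) :
    bScan text = true ↔ ∃ j : Nat, startsAnyIndicator (text.drop j) = true := by
  induction text with
  | nil =>
      simp only [bScan, List.drop_nil]
      constructor
      · intro h; exact absurd h (by decide)
      · rintro ⟨j, hj⟩; exact absurd hj (by simp [startsAnyIndicator_nil])
  | cons c rest ih =>
      have hcons : bScan (c :: rest) = (startsAnyIndicator (c :: rest) || bScan rest) := by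
        simp only [bScan]
        by_cases h : startsAnyIndicator (c :: rest) = true <;> simp [h]
      rw [hcons]
      simp only [Bool.or_eq_true, ih]
      constructor
      · rintro (h | ⟨j, hj⟩)
        · exact ⟨0, by simpa using h⟩
        · exact ⟨j + 1, by simpa using hj⟩
      · rintro ⟨j, hj⟩
        cases j with
        | zero => exact Or.inl (by simpa using hj)
        | succ j => exact Or.inr ⟨j, by simpa using hj⟩

-- bridge: some indicator is a substring  ↔  B's scan fires
lemma any_isIn_iff_bScan (text : List Char) :
    (photoIndicators.any (fun ind => PySem.Chars.isIn ind text) = true) ↔ bScan text = true := by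
  rw [bScan_iff]
  simp only [List.any_eq_true, startsAnyIndicator]
  constructor
  · rintro ⟨ind, hmem, hin⟩
    obtain ⟨j, hj⟩ := (PySem.Chars.exists_prefix_drop_iff_isIn ind text).mpr hin
    exact ⟨j, ind, hmem, (PySem.Chars.startswith_iff _ _).mpr hj⟩
  · rintro ⟨j, ind, hmem, hsw⟩
    exact ⟨ind, hmem,
      (PySem.Chars.exists_prefix_drop_iff_isIn ind text).mp
        ⟨j, (PySem.Chars.startswith_iff _ _).mp hsw⟩⟩

-- ===== VERDICT (by name: the statement is the Claim_ definition above) =====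
theorem check_modern_photograph_spec : Claim_equal_check_modern_photograph := by
  intro url title _
  unfold Spec_check_modern_photograph check_modern_photograph check_modern_photograph_alt
  simp only [aIndicatorLoop_eq_any]
  by_cases h : bScan (PySem.Chars.lower (url.toList ++ [' '] ++ title.toList)) = true
  · rw [if_pos ((any_isIn_iff_bScan _).mpr h), if_pos h]
  · rw [if_neg (fun hc => h ((any_isIn_iff_bScan _).mp hc)), if_neg h]
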